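-- pv_equiv track=rewrite | github.com/eddiemo/ATDS | Rings&Ideals.py | closedidealopers
-- ===== SOURCE A (Python) =====
-- def closedidealopers(initset, m):
--     for elem1 in initset:
--         for elem2 in initset:
--             if not (elem1 - elem2) % m in initset:
--                 return False
--     for elem1 in initset:
--         for elem2 in range(m):
--             if not (elem1 * elem2) % m in initset:
--                 return False
--     return True
-- ===== SOURCE B (Python) =====
-- def _gcd(a, b):
--     while b:
--         a, b = b, a % b
--     return a
--
--
-- def closedidealopers(initset, m):
--     s = set(initset)
--     if not s:
--         return True
--     d = abs(m)
--     for x in s: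
--         d = _gcd(d, abs(x))
--     step = d if m > 0 else -d
--     return all(k in s for k in range(0, m, step))
-- ===== Notes on version B (the rewrite author's own statement) =====
-- stated objective: alternative
-- what changed: Instead of A's nested scans checking every pairwise difference and every product against the list, B computes d = gcd of m and all elements once and checks that each multiple of d in the residue window of m is in a hash set.
import Mathlib
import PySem

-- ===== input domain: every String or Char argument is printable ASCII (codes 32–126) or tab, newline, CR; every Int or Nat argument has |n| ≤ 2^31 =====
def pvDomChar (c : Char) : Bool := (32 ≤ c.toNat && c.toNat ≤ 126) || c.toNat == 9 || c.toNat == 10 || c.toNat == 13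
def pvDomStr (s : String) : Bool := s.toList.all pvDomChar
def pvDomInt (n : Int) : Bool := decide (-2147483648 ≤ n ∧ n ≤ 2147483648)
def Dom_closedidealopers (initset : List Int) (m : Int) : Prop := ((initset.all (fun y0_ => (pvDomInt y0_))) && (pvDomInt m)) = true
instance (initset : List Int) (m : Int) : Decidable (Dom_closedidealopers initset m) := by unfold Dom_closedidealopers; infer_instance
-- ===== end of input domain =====

-- B replaces A's nested pairwise-difference and product membership scans by a number-theoretic
-- characterization: compute d = gcd of m and the elements, then check that every multiple of d in the
-- residue window of m lies in a hash set (alternative algorithm).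

-- ===== PORT A =====
def closedidealopers (initset : List Int) (m : Int) : Bool :=
  ((initset.all fun elem1 =>
      initset.all fun elem2 =>
        initset.contains (PySem.Int.mod (elem1 - elem2) m)) &&
    (initset.all fun elem1 =>
      (PySem.List.pyRange 0 m 1).all fun elem2 =>
        initset.contains (PySem.Int.mod (elem1 * elem2) m)))

-- ===== PORT B =====
-- Source B's Euclidean loop `while b: a, b = b, a % b; return a` on nonnegative arguments is,
-- iteration for iteration, Nat.gcd applied to the swapped pair (Nat.gcd 0 a = a; Nat.gcd b a = Nat.gcd (a % b) b).

-- the generator `all(k in s for k in range(0, m, step))`: range is lazy and all short-circuits,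
-- so the loop is transliterated as a recursion stepping k by step while range(0, m, step) would yield
def altAll (s : PySem.Set Int) (m step k : Int) : Bool :=
  if _h : (0 < step ∧ k < m) ∨ (step < 0 ∧ m < k) then
    s.contains k && altAll s m step (k + step)
  else true
termination_by (if 0 < step then m - k else k - m).toNat
decreasing_by
  rcases _h with ⟨h1, h2⟩ | ⟨h1, h2⟩
  · simp only [if_pos h1]
    omega
  · rw [if_neg (by omega), if_neg (by omega)]
    omega

def closedidealopers_alt (initset : List Int) (m : Int) : Bool :=
  let s : PySem.Set Int := PySem.Set.ofList initset
  if s.isEmpty then true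
  else
    let d : Int := (s.foldl (fun g x => Nat.gcd x.natAbs g) m.natAbs : Nat)
    let step : Int := if 0 < m then d else -d
    altAll s m step 0

-- ===== PRECONDITION & SPEC =====
-- Pre_ excludes only m = 0 with a nonempty set, where A raises ZeroDivisionError.
def Pre_closedidealopers (initset : List Int) (m : Int) : Prop := m ≠ 0 ∨ initset = []
instance (initset : List Int) (m : Int) : Decidable (Pre_closedidealopers initset m) := by unfold Pre_closedidealopers; infer_instance
def pvWitness_closedidealopers : List Int × Int := ([0, 1, 2], 3)

def Spec_closedidealopers (initset : List Int) (m : Int) (out : Bool) : Prop := out = closedidealopers_alt initset m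
instance (initset : List Int) (m : Int) (out : Bool) : Decidable (Spec_closedidealopers initset m out) := by unfold Spec_closedidealopers; infer_instance

-- ===== CLAIM (what is proved, stated in full; the proofs are below) =====
def Claim_equal_closedidealopers : Prop := ∀ (initset : List Int) (m : Int), Dom_closedidealopers initset m → Pre_closedidealopers initset m → Spec_closedidealopers initset m (closedidealopers initset m)

-- ===== LEMMAS AND PROOFS =====

-- the window of Python residues modulo m
def pvWindow (m k : Int) : Prop := (0 < m ∧ 0 ≤ k ∧ k < m) ∨ (m < 0 ∧ m < k ∧ k ≤ 0)

theorem pv_dvd_sub_mod (p m : Int) : m ∣ (p - PySem.Int.mod p m) := by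
  have h := PySem.Int.floordiv_mul_add_mod p m
  exact ⟨PySem.Int.floordiv p m, by linarith [mul_comm (PySem.Int.floordiv p m) m]⟩

theorem pv_window_mod (p m : Int) (hm : m ≠ 0) : pvWindow m (PySem.Int.mod p m) := by
  rcases lt_or_gt_of_ne hm with h | h
  · exact Or.inr ⟨h, (PySem.Int.mod_neg_bounds p h).1, (PySem.Int.mod_neg_bounds p h).2⟩
  · exact Or.inl ⟨h, PySem.Int.mod_nonneg p h, PySem.Int.mod_lt p h⟩

theorem pv_window_inj {m k k' : Int} (h : pvWindow m k) (h' : pvWindow m k')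
    (hd : m ∣ (k - k')) : k = k' := by
  have habs : |m| ∣ (k - k') := (abs_dvd _ _).2 hd
  have : k - k' = 0 := by
    apply Int.eq_zero_of_abs_lt_dvd habs
    rcases h with ⟨h1, h2, h3⟩ | ⟨h1, h2, h3⟩ <;> rcases h' with ⟨g1, g2, g3⟩ | ⟨g1, g2, g3⟩ <;>
      rcases abs_cases m with ⟨e1, e2⟩ | ⟨e1, e2⟩ <;>
      rcases abs_cases (k - k') with ⟨f1, f2⟩ | ⟨f1, f2⟩ <;> omega
  omega

theorem pv_mod_congr {m p q : Int} (hm : m ≠ 0) (h : m ∣ (p - q)) :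
    PySem.Int.mod p m = PySem.Int.mod q m := by
  apply pv_window_inj (pv_window_mod p m hm) (pv_window_mod q m hm)
  have h1 := pv_dvd_sub_mod p m
  have h2 := pv_dvd_sub_mod q m
  have h3 : PySem.Int.mod p m - PySem.Int.mod q m
      = (p - q) - (p - PySem.Int.mod p m) + (q - PySem.Int.mod q m) := by ring
  rw [h3]
  exact dvd_add (dvd_sub h h1) h2

theorem pv_mod_window_id {m k : Int} (hm : m ≠ 0) (h : pvWindow m k) :
    PySem.Int.mod k m = k :=
  pv_window_inj (pv_window_mod k m hm) h (by simpa [neg_sub] using dvd_neg.mpr (pv_dvd_sub_mod k m))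

theorem pv_dvd_mod {d p m : Int} (hdm : d ∣ m) (hdp : d ∣ p) : d ∣ PySem.Int.mod p m := by
  rcases pv_dvd_sub_mod p m with ⟨c, hc⟩
  have h : PySem.Int.mod p m = p - m * c := by linarith
  rw [h]
  exact dvd_sub hdp (hdm.mul_right c)

theorem pv_fold_dvd_init (l : List Int) (g : Nat) :
    (l.foldl (fun g x => Nat.gcd x.natAbs g) g) ∣ g := by
  induction l generalizing g with
  | nil => exact dvd_refl g
  | cons x l ih =>
    simpa using (ih (Nat.gcd x.natAbs g)).trans (Nat.gcd_dvd_right _ _)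

theorem pv_fold_dvd_mem (l : List Int) (g : Nat) {x : Int} (hx : x ∈ l) :
    ((l.foldl (fun g x => Nat.gcd x.natAbs g) g : Nat) : Int) ∣ x := by
  induction l generalizing g with
  | nil => cases hx
  | cons y l ih =>
    rcases List.mem_cons.1 hx with rfl | hx
    · simp only [List.foldl_cons]
      have h1 : (l.foldl (fun g x => Nat.gcd x.natAbs g) (Nat.gcd x.natAbs g)) ∣ Nat.gcd x.natAbs g :=
        pv_fold_dvd_init l _
      have h2 : Nat.gcd x.natAbs g ∣ x.natAbs := Nat.gcd_dvd_left _ _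
      exact (Int.natCast_dvd_natCast.2 (h1.trans h2)).trans (Int.natAbs_dvd.2 dvd_rfl)
    · simpa using ih (Nat.gcd y.natAbs g) hx

theorem pv_fold_mem_subgroup (l : List Int) (g : Nat) (H : AddSubgroup Int)
    (hg : (g : Int) ∈ H) (hl : ∀ x ∈ l, x ∈ H) :
    ((l.foldl (fun g x => Nat.gcd x.natAbs g) g : Nat) : Int) ∈ H := by
  induction l generalizing g with
  | nil => exact hg
  | cons x l ih =>
    simp only [List.foldl_cons]
    apply ih
    · have hx : x ∈ H := hl x (List.mem_cons_self)
      have hbez := Int.gcd_eq_gcd_ab x (g : Int)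
      have hgcd : (Nat.gcd x.natAbs g : Int) = Int.gcd x (g : Int) := by
        simp [Int.gcd]
      rw [hgcd, hbez]
      apply AddSubgroup.add_mem
      · simpa [zsmul_eq_mul, mul_comm] using AddSubgroup.zsmul_mem H hx (Int.gcdA x (g : Int))
      · simpa [zsmul_eq_mul, mul_comm] using AddSubgroup.zsmul_mem H hg (Int.gcdB x (g : Int))
    · exact fun y hy => hl y (List.mem_cons_of_mem _ hy)

theorem pv_fold_pos (l : List Int) {g : Nat} (hg : 0 < g) :
    0 < l.foldl (fun g x => Nat.gcd x.natAbs g) g := by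
  induction l generalizing g with
  | nil => exact hg
  | cons x l ih => exact ih (Nat.gcd_pos_of_pos_right _ hg)

theorem pv_altAll_pos (s : PySem.Set Int) (m step : Int) (hs : 0 < step) (k0 : Int) :
    altAll s m step k0 = true ↔
      ∀ k, k0 ≤ k → k < m → step ∣ (k - k0) → s.contains k = true := by
  by_cases hk : k0 < m
  · unfold altAll
    rw [dif_pos (Or.inl ⟨hs, hk⟩), Bool.and_eq_true, pv_altAll_pos s m step hs (k0 + step)]
    constructor
    · rintro ⟨h0, hrest⟩ k hk1 hk2 ⟨c, hc⟩
      rcases eq_or_lt_of_le hk1 with rfl | hlt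
      · exact h0
      · have hc0 : 1 ≤ c := by nlinarith
        have hstep : step * 1 ≤ step * c := mul_le_mul_of_nonneg_left hc0 hs.le
        exact hrest k (by nlinarith) hk2 ⟨c - 1, by linear_combination hc⟩
    · intro h
      refine ⟨h k0 le_rfl hk ⟨0, by ring⟩, fun k h1 h2 hd => ?_⟩
      rcases hd with ⟨c, hc⟩
      exact h k (by nlinarith) h2 ⟨c + 1, by linear_combination hc⟩
  · unfold altAll
    rw [dif_neg (by omega)]
    simp only [true_iff]
    intro k h1 h2 _
    omega
termination_by (m - k0).toNat
decreasing_by omega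

theorem pv_altAll_neg (s : PySem.Set Int) (m step : Int) (hs : step < 0) (k0 : Int) :
    altAll s m step k0 = true ↔
      ∀ k, k ≤ k0 → m < k → step ∣ (k - k0) → s.contains k = true := by
  by_cases hk : m < k0
  · unfold altAll
    rw [dif_pos (Or.inr ⟨hs, hk⟩), Bool.and_eq_true, pv_altAll_neg s m step hs (k0 + step)]
    constructor
    · rintro ⟨h0, hrest⟩ k hk1 hk2 ⟨c, hc⟩
      rcases eq_or_lt_of_le hk1 with rfl | hlt
      · exact h0
      · have hc0 : 1 ≤ c := by nlinarith
        have hstep : step * c ≤ step * 1 := by nlinarith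
        exact hrest k (by nlinarith) hk2 ⟨c - 1, by linear_combination hc⟩
    · intro h
      refine ⟨h k0 le_rfl hk ⟨0, by ring⟩, fun k h1 h2 hd => ?_⟩
      rcases hd with ⟨c, hc⟩
      exact h k (by nlinarith) h2 ⟨c + 1, by linear_combination hc⟩
  · unfold altAll
    rw [dif_neg (by omega)]
    simp only [true_iff]
    intro k h1 h2 _
    omega
termination_by (k0 - m).toNat
decreasing_by omega

-- the heart: A's one-step closure conditions ↔ "every multiple of d in the window is in the set"
theorem pv_main (initset : List Int) (m : Int) (hm : m ≠ 0) (hne : initset ≠ []) :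
    closedidealopers initset m = closedidealopers_alt initset m := by
  set dn : Nat := (PySem.Set.ofList initset).foldl (fun g x => Nat.gcd x.natAbs g) m.natAbs with hdn
  have hd0 : 0 < dn := pv_fold_pos _ (Int.natAbs_pos.2 hm)
  have hdm : (dn : Int) ∣ m :=
    (Int.natCast_dvd_natCast.2 (pv_fold_dvd_init _ _)).trans (Int.natAbs_dvd.2 dvd_rfl)
  have hdmem : ∀ x ∈ initset, (dn : Int) ∣ x := fun x hx =>
    pv_fold_dvd_mem _ _ ((PySem.Set.mem_ofList initset x).2 hx)
  have hsne : (PySem.Set.ofList initset).isEmpty = false := by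
    rcases List.exists_mem_of_ne_nil initset hne with ⟨a, ha⟩
    have hmem := (PySem.Set.mem_ofList initset a).2 ha
    simp only [List.isEmpty_eq_false_iff, ne_eq]
    intro h
    rw [h] at hmem
    exact absurd hmem (List.not_mem_nil)
  -- characterize B
  have hB : closedidealopers_alt initset m = true ↔
      (∀ k : Int, pvWindow m k → (dn : Int) ∣ k → k ∈ initset) := by
    have hdZ : (0 : Int) < (dn : Int) := Int.natCast_pos.2 hd0
    unfold closedidealopers_alt
    simp only [hsne, Bool.false_eq_true, if_false, ← hdn]
    rcases lt_or_gt_of_ne hm with hneg | hpos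
    · rw [if_neg (by omega), pv_altAll_neg _ _ _ (by omega) 0]
      simp only [PySem.Set.contains, List.contains_iff_mem, PySem.Set.mem_ofList, sub_zero]
      constructor
      · intro h k hwin hdk
        rcases hwin with ⟨h1, _, _⟩ | ⟨_, h2, h3⟩
        · omega
        · exact h k h3 h2 ((neg_dvd (α := Int)).2 hdk)
      · intro h k h1 h2 h4
        exact h k (Or.inr ⟨hneg, h2, h1⟩) (neg_dvd.1 h4)
    · rw [if_pos hpos, pv_altAll_pos _ _ _ hdZ 0]
      simp only [PySem.Set.contains, List.contains_iff_mem, PySem.Set.mem_ofList, sub_zero]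
      constructor
      · intro h k hwin hdk
        rcases hwin with ⟨_, h2, h3⟩ | ⟨h1, _, _⟩
        · exact h k h2 h3 hdk
        · omega
      · intro h k h1 h2 h4
        exact h k (Or.inl ⟨hpos, h1, h2⟩) h4
  -- characterize A
  have hA : closedidealopers initset m = true ↔
      ((∀ a ∈ initset, ∀ b ∈ initset, PySem.Int.mod (a - b) m ∈ initset) ∧
       (∀ a ∈ initset, ∀ e, 0 ≤ e → e < m → PySem.Int.mod (a * e) m ∈ initset)) := by
    rw [closedidealopers]
    simp [List.all_eq_true, PySem.List.mem_pyRange_one]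
  rw [Bool.eq_iff_iff, hA, hB]
  constructor
  · rintro ⟨h1, _h2⟩
    -- forward: subgroup argument
    rcases List.exists_mem_of_ne_nil initset hne with ⟨a, ha⟩
    have h0 : (0 : Int) ∈ initset := by
      have := h1 a ha a ha
      rwa [sub_self, (PySem.Int.mod_eq_zero_iff_dvd 0 m).2 (dvd_zero m)] at this
    set H : AddSubgroup Int := AddSubgroup.closure ({x | x ∈ initset} ∪ {m}) with hH
    have hgood : ∀ z ∈ H, PySem.Int.mod z m ∈ initset := by
      intro z hz
      induction hz using AddSubgroup.closure_induction with
      | mem x hx =>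
        rcases hx with hx | hx
        · have := h1 x hx 0 h0
          rwa [sub_zero] at this
        · have hx' : x = m := hx
          rw [hx', (PySem.Int.mod_eq_zero_iff_dvd m m).2 dvd_rfl]
          exact h0
      | zero =>
        rw [(PySem.Int.mod_eq_zero_iff_dvd 0 m).2 (dvd_zero m)]
        exact h0
      | add x y _ _ hx hy =>
        have hw : PySem.Int.mod (0 - PySem.Int.mod y m) m ∈ initset := h1 0 h0 _ hy
        have hstep := h1 _ hx _ hw
        rcases pv_dvd_sub_mod x m with ⟨a1, e1⟩
        rcases pv_dvd_sub_mod y m with ⟨b1, e2⟩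
        rcases pv_dvd_sub_mod (0 - PySem.Int.mod y m) m with ⟨c1, e3⟩
        have hcong : PySem.Int.mod (x + y) m =
            PySem.Int.mod (PySem.Int.mod x m - PySem.Int.mod (0 - PySem.Int.mod y m) m) m := by
          apply pv_mod_congr hm
          exact ⟨a1 + b1 - c1, by linear_combination e1 + e2 - e3⟩
        rwa [hcong]
      | neg x _ hx =>
        have hstep := h1 0 h0 _ hx
        rcases pv_dvd_sub_mod x m with ⟨a1, e1⟩
        rcases pv_dvd_sub_mod (0 - PySem.Int.mod x m) m with ⟨c1, e3⟩
        have hcong : PySem.Int.mod (-x) m =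
            PySem.Int.mod (0 - PySem.Int.mod x m) m := by
          apply pv_mod_congr hm
          exact ⟨-a1, by linear_combination -e1⟩
        rwa [hcong]
    have hdH : (dn : Int) ∈ H := by
      apply pv_fold_mem_subgroup
      · rcases Int.natAbs_eq m with h | h
        · rw [← h]
          exact AddSubgroup.subset_closure (Or.inr rfl)
        · have hmH : m ∈ H := AddSubgroup.subset_closure (Or.inr rfl)
          have := AddSubgroup.neg_mem H hmH
          rw [h]
          simpa using this
      · intro x hx
        exact AddSubgroup.subset_closure (Or.inl ((PySem.Set.mem_ofList initset x).1 hx))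
    intro k hwin hdk
    rcases hdk with ⟨c, hc⟩
    have hkH : k ∈ H := by
      rw [hc, mul_comm]
      simpa [zsmul_eq_mul] using AddSubgroup.zsmul_mem H hdH c
    have := hgood k hkH
    rwa [pv_mod_window_id hm hwin] at this
  · intro hP
    refine ⟨?_, ?_⟩
    · intro a ha b hb
      exact hP _ (pv_window_mod _ m hm) (pv_dvd_mod hdm (dvd_sub (hdmem a ha) (hdmem b hb)))
    · intro a ha e _ _
      exact hP _ (pv_window_mod _ m hm) (pv_dvd_mod hdm ((hdmem a ha).mul_right e))

-- ===== VERDICT (by name: the statement is the Claim_ definition above) =====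
theorem closedidealopers_spec : Claim_equal_closedidealopers := by
  intro initset m _ hpre
  unfold Spec_closedidealopers
  rcases hpre with hm | hnil
  · by_cases hne : initset = []
    · subst hne; rfl
    · exact pv_main initset m hm hne
  · subst hnil; rfl
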